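-- pv_equiv track=rewrite | github.com/irfanznz/CS4775-final-proj | profile_hmm.py | get_emission_counts
-- ===== SOURCE A (Python) =====
-- AMINO_ACIDS = "ACDEFGHIKLMNPQRSTVWY"
--
-- def get_alignment_columns(multiple_alignment):
--     """
--     Given a multiple alignment, returns a list of columns, where each column is a list of characters, one for each sequence in the alignment
--
--     Args:
--         - multiple_alignment: a list of strings representing the sequences in the multiple alignment
--
--     Returns:
--         - columns: a list of columns, where each column is a string of characters, one for each sequence in the alignment
--     """
--     columns = []
--     for i in range(len(multiple_alignment[0])):
--         column = ""
--         for sequence in multiple_alignment: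
--             column += sequence[i]
--         columns.append(column)
--     return columns
--
-- def get_match_states(multiple_alignment):
--     """
--     Given a multiple alignment, returns the number of match states in the profile HMM and a string with the same length as the multiple alignment, with a * for match states and a space for other states
--
--     Args:
--         - multiple_alignment: a list of strings representing the sequences in   the multiple alignment
--
--     Returns:
--         - match_states: the number of match states in the profile HMM
--         - match_pattern: a list of booleans, where True indicates a match state and False indicates a non-match state
--     """
--     num_sequences = len(multiple_alignment)
--     match_states = 0
--     match_pattern = []
--     for col in range(len(multiple_alignment[0])):
--         count_gaps = 0
--         for seqeuence in multiple_alignment: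
--             if seqeuence[col] == "-":
--                 count_gaps += 1
--         if count_gaps < num_sequences // 2:
--             match_states += 1
--             match_pattern.append(True)
--         else:
--             match_pattern.append(False)
--     return (match_states, match_pattern)
--
-- def get_emission_counts(multiple_alignment):
--     """
--     Given a multiple alignment, returns a list of dictionaries, where each dictionary contains the number of times each amino acid appears in each column corresponding to a match state.
--     """
--     match_states, match_pattern = get_match_states(multiple_alignment)
--     alignment_columns = get_alignment_columns(multiple_alignment)
--     emission_counts_list = []
--
--     for col, match in zip(alignment_columns, match_pattern):
--         emission_counts = {a: 0 for a in AMINO_ACIDS}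
--         if match:
--             for char in col:
--                 if char != '-':
--                     emission_counts[char] += 1
--             emission_counts_list.append(emission_counts)
--
--     return emission_counts_list
-- ===== SOURCE B (Python) =====
-- AMINO_ACIDS = "ACDEFGHIKLMNPQRSTVWY"
--
-- def get_emission_counts(multiple_alignment):
--     threshold = len(multiple_alignment) // 2
--     result = []
--     for i in range(len(multiple_alignment[0])):
--         tally = {}
--         for seq in multiple_alignment:
--             c = seq[i]
--             tally[c] = tally.get(c, 0) + 1
--         if tally.get('-', 0) < threshold:
--             result.append({a: tally.get(a, 0) for a in AMINO_ACIDS})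
--     return result
-- ===== Notes on version B (the rewrite author's own statement) =====
-- stated objective: simpler
-- what changed: Replaces the two precomputed whole-alignment tables (columns list and match-state pattern) and the zip/increment pass with a single loop over column indices that builds one per-column character counter dict, reading both the gap test and all twenty amino-acid counts from that counter.
import Mathlib
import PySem

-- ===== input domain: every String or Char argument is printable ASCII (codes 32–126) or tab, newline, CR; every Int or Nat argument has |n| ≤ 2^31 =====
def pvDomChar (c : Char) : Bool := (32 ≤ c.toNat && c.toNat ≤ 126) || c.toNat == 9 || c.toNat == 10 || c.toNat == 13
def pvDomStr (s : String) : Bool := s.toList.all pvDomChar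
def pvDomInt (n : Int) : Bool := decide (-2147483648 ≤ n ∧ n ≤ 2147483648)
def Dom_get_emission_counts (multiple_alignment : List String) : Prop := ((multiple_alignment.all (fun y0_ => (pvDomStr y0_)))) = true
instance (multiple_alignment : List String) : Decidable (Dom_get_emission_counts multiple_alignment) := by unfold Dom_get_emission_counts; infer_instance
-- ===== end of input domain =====

-- B replaces A's two precomputed whole-alignment tables (columns + match pattern) by a single
-- loop over column indices that builds one per-column character counter and reads both the gap
-- test and the amino-acid counts from it (objective: simpler; same asymptotic cost).


-- AMINO_ACIDS = "ACDEFGHIKLMNPQRSTVWY"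
def pvAmino : List Char := "ACDEFGHIKLMNPQRSTVWY".toList

-- ===== PORT A =====
-- get_alignment_columns: columns as List Char (a Python string is its character sequence);
-- sequence[i] is in range for every input admitted by Pre_, so the total getD form is exact there.
def pvA_alignment_columns (multiple_alignment : List String) : List (List Char) :=
  (List.range (multiple_alignment.headD "").length).foldl
    (fun columns i =>
      columns ++ [multiple_alignment.foldl (fun col s => col ++ [s.toList.getD i ' ']) []])
    []

-- get_match_states
def pvA_match_states (multiple_alignment : List String) : Int × List Bool :=
  let num_sequences : Int := (multiple_alignment.length : Int)
  (List.range (multiple_alignment.headD "").length).foldl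
    (fun st col =>
      let count_gaps : Int :=
        multiple_alignment.foldl
          (fun c s => if s.toList.getD col ' ' = '-' then c + 1 else c) 0
      if count_gaps < PySem.Int.floordiv num_sequences 2 then (st.1 + 1, st.2 ++ [true])
      else (st.1, st.2 ++ [false]))
    ((0 : Int), ([] : List Bool))

-- get_emission_counts: the dict {a: 0 for a in AMINO_ACIDS} then 'emission_counts[char] += 1';
-- Dict.modify with default 0 is exact wherever Python does not raise KeyError (guaranteed by Pre_).
def get_emission_counts (multiple_alignment : List String) : List (List (String × Int)) :=
  let ms := pvA_match_states multiple_alignment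
  let alignment_columns := pvA_alignment_columns multiple_alignment
  (alignment_columns.zip ms.2).foldl
    (fun acc p =>
      let emission_counts : PySem.Dict String Int :=
        pvAmino.foldl (fun d a => d.insert (String.ofList [a]) 0) PySem.Dict.empty
      if p.2 then
        acc ++ [(p.1.foldl
                  (fun d c => if c ≠ '-' then d.modify (String.ofList [c]) 0 (· + 1) else d)
                  emission_counts).items]
      else acc)
    []

-- ===== PORT B =====
-- one loop over column indices; a per-column counter dict; seq[i] in range under Pre_.
def get_emission_counts_alt (multiple_alignment : List String) : List (List (String × Int)) :=
  let threshold : Int := PySem.Int.floordiv (multiple_alignment.length : Int) 2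
  (List.range (multiple_alignment.headD "").length).foldl
    (fun result i =>
      let tally : PySem.Dict Char Int :=
        multiple_alignment.foldl
          (fun t s =>
            let c := s.toList.getD i ' '
            t.insert c (t.getD c 0 + 1))
          PySem.Dict.empty
      if tally.getD '-' 0 < threshold then
        result ++ [pvAmino.map (fun a => (String.ofList [a], tally.getD a 0))]
      else result)
    []

-- ===== PRECONDITION & SPEC =====
-- column i of the alignment (total form; in range under the length condition of Pre_)
def pvColumn (multiple_alignment : List String) (i : Nat) : List Char :=
  multiple_alignment.map (fun s => s.toList.getD i ' ')

-- Pre_ excludes exactly the inputs on which Python A raises: the empty alignment (IndexError on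
-- multiple_alignment[0]), a sequence shorter than the first (IndexError), and a match-state column
-- containing a non-gap character outside AMINO_ACIDS (KeyError on emission_counts[char] += 1).
def Pre_get_emission_counts (multiple_alignment : List String) : Prop :=
  multiple_alignment ≠ [] ∧
  (multiple_alignment.all
    (fun s => (multiple_alignment.headD "").length ≤ s.length)) = true ∧
  ((List.range (multiple_alignment.headD "").length).all
    (fun i =>
      !(decide ((pvColumn multiple_alignment i).count '-' < multiple_alignment.length / 2)) ||
      (pvColumn multiple_alignment i).all (fun c => c == '-' || pvAmino.contains c))) = true

instance (multiple_alignment : List String) : Decidable (Pre_get_emission_counts multiple_alignment) := by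
  unfold Pre_get_emission_counts; infer_instance

def pvWitness_get_emission_counts : List String := ["AC-D", "A--D", "ACCD"]

def Spec_get_emission_counts (multiple_alignment : List String) (out : List (List (String × Int))) : Prop := out = get_emission_counts_alt multiple_alignment
instance (multiple_alignment : List String) (out : List (List (String × Int))) : Decidable (Spec_get_emission_counts multiple_alignment out) := by unfold Spec_get_emission_counts; infer_instance

-- ===== CLAIM (what is proved, stated in full; the proofs are below) =====
def Claim_equal_get_emission_counts : Prop := ∀ (multiple_alignment : List String), Dom_get_emission_counts multiple_alignment → Pre_get_emission_counts multiple_alignment → Spec_get_emission_counts multiple_alignment (get_emission_counts multiple_alignment)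

-- ===== LEMMAS AND PROOFS =====


-- second component of A's match-state fold, generically
theorem pv_snd_foldl {A B C : Type} (l : List C) (F : A × B → C → A × B) (G : B → C → B)
    (h : ∀ st i, (F st i).2 = G st.2 i) (init : A × B) :
    (l.foldl F init).2 = l.foldl G init.2 := by
  induction l generalizing init with
  | nil => rfl
  | cons x t ih => rw [List.foldl_cons, List.foldl_cons, ih, h]

theorem pv_set_update_of_mem {A : Type} [BEq A] [LawfulBEq A] (l s : List A)
    (h : ∀ x ∈ l, x ∈ s) : PySem.Set.update s l = s := by
  induction l generalizing s with
  | nil => rfl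
  | cons x t ih =>
    have hx : PySem.Set.add s x = s := by
      simp [PySem.Set.add, PySem.Set.contains, h x List.mem_cons_self]
    simp only [PySem.Set.update, List.foldl_cons] at *
    rw [hx]
    exact ih s (fun y hy => h y (List.mem_cons_of_mem _ hy))

theorem pv_ofList_inj : Function.Injective (fun c : Char => String.ofList [c]) := by
  intro a b h
  have := congrArg String.toList h
  simpa using this

def pvEc0 : PySem.Dict String Int :=
  pvAmino.foldl (fun d a => d.insert (String.ofList [a]) 0) PySem.Dict.empty

theorem pv_ec0_items : pvEc0.items = pvAmino.map (fun a => (String.ofList [a], (0 : Int))) := by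
  unfold pvEc0
  rw [PySem.Dict.items_foldl_insert_fresh (k := fun a => String.ofList [a]) (v := fun _ => (0 : Int))
        (l := pvAmino) (d := PySem.Dict.empty) (by intro a _; simp) (by decide)]
  simp [PySem.Dict.empty]

theorem pv_ec0_keys : pvEc0.keys = pvAmino.map (fun a => String.ofList [a]) := by
  simp only [PySem.Dict.keys, pv_ec0_items, List.map_map]
  rfl

theorem pv_ec0_nodup : pvEc0.keys.Nodup := by
  rw [pv_ec0_keys]; decide

-- A's per-match-column dict, as computed by the port of A
def pvAdict (col : List Char) : PySem.Dict String Int :=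
  col.foldl (fun d c => if c ≠ '-' then d.modify (String.ofList [c]) 0 (· + 1) else d) pvEc0

theorem pv_Adict_items (col : List Char) (hcol : ∀ c ∈ col, c = '-' ∨ c ∈ pvAmino) :
    (pvAdict col).items =
      pvAmino.map (fun a => (String.ofList [a], (col.count a : Int))) := by
  have hfold : pvAdict col =
      ((col.filter (fun c => decide (c ≠ '-'))).map (fun c => String.ofList [c])).foldl
        (fun d x => d.modify x 0 (· + 1)) pvEc0 := by
    unfold pvAdict
    rw [PySem.List.foldl_ite_eq_foldl_filter, List.foldl_map]
  have hmemkeys : ∀ x ∈ (col.filter (fun c => decide (c ≠ '-'))).map (fun c => String.ofList [c]),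
      x ∈ pvEc0.keys := by
    intro x hx
    rw [List.mem_map] at hx
    obtain ⟨c, hc, rfl⟩ := hx
    rw [List.mem_filter] at hc
    have : c ∈ pvAmino := by
      rcases hcol c hc.1 with h | h
      · exact absurd (decide_eq_true_eq.mp hc.2) (by simp [h])
      · exact h
    rw [pv_ec0_keys]
    exact List.mem_map_of_mem this
  have hkeys : (pvAdict col).keys = pvEc0.keys := by
    rw [hfold, PySem.Dict.keys_foldl_modify, pv_set_update_of_mem _ _ hmemkeys]
  have hnodup : (pvAdict col).keys.Nodup := by rw [hkeys]; exact pv_ec0_nodup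
  rw [PySem.Dict.items_eq_map_keys _ hnodup 0, hkeys, pv_ec0_keys, List.map_map]
  apply List.map_congr_left
  intro a ha
  have hane : a ≠ '-' := by intro h; rw [h] at ha; exact absurd ha (by decide)
  have hgd : (pvAdict col).getD (String.ofList [a]) 0 =
      pvEc0.getD (String.ofList [a]) 0 +
        ((col.filter (fun c => decide (c ≠ '-'))).map (fun c => String.ofList [c])).count
          (String.ofList [a]) := by
    rw [hfold, PySem.Dict.getD_foldl_modify_add_one]
  have hmem : (String.ofList [a], (0 : Int)) ∈ pvEc0.items := by
    rw [pv_ec0_items]; exact List.mem_map_of_mem ha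
  have hec0 : pvEc0.getD (String.ofList [a]) 0 = 0 :=
    PySem.Dict.getD_of_mem_items pvEc0 hmem pv_ec0_nodup 0
  have hcnt : ((col.filter (fun c => decide (c ≠ '-'))).map (fun c => String.ofList [c])).count
      (String.ofList [a]) = col.count a := by
    rw [List.count_map_of_injective _ _ pv_ofList_inj, List.count_filter (by simp [hane])]
  simp only [Function.comp, hgd, hec0, hcnt, zero_add]

theorem pv_cg_fold (l : List String) (c0 : Int) (i : Nat) :
    l.foldl (fun c s => if s.toList.getD i ' ' = '-' then c + 1 else c) c0 =
      c0 + ((pvColumn l i).count '-' : Int) := by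
  induction l generalizing c0 with
  | nil => simp [pvColumn]
  | cons x t ih =>
    rw [List.foldl_cons, ih]
    simp only [pvColumn, List.map_cons, List.count_cons, beq_iff_eq]
    split_ifs <;> push_cast <;> ring

-- A in filter/map form (unconditional)
theorem pv_A_eq (ma : List String) :
    get_emission_counts ma =
      ((List.range (ma.headD "").length).filter
          (fun i => decide (((pvColumn ma i).count '-' : Int) < PySem.Int.floordiv (ma.length : Int) 2))).map
        (fun i => (pvAdict (pvColumn ma i)).items) := by
  have hcols : pvA_alignment_columns ma = (List.range (ma.headD "").length).map (pvColumn ma) := by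
    unfold pvA_alignment_columns
    rw [PySem.List.foldl_append_singleton_eq_map]
    simp only [List.nil_append]
    apply List.map_congr_left
    intro i _
    rw [PySem.List.foldl_append_singleton_eq_map, List.nil_append]
    rfl
  have hcg : ∀ i : Nat, ma.foldl (fun c s => if s.toList.getD i ' ' = '-' then c + 1 else c) (0 : Int) =
      ((pvColumn ma i).count '-' : Int) := fun i => by
    rw [pv_cg_fold ma 0 i, zero_add]
  have hpat : (pvA_match_states ma).2 =
      (List.range (ma.headD "").length).map
        (fun i => decide (((pvColumn ma i).count '-' : Int) < PySem.Int.floordiv (ma.length : Int) 2)) := by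
    unfold pvA_match_states
    rw [pv_snd_foldl _ _
          (fun b i => b ++ [decide (((pvColumn ma i).count '-' : Int) <
            PySem.Int.floordiv (ma.length : Int) 2)])
          (fun st i => by
            dsimp only
            rw [hcg i]
            split_ifs with hc
            · rw [decide_eq_true hc]
            · rw [decide_eq_false hc]) _,
        PySem.List.foldl_append_singleton_eq_map, List.nil_append]
  show (let ms := pvA_match_states ma
        let alignment_columns := pvA_alignment_columns ma
        (alignment_columns.zip ms.2).foldl
          (fun acc p =>
            let emission_counts : PySem.Dict String Int :=
              pvAmino.foldl (fun d a => d.insert (String.ofList [a]) 0) PySem.Dict.empty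
            if p.2 then
              acc ++ [(p.1.foldl
                        (fun d c => if c ≠ '-' then d.modify (String.ofList [c]) 0 (· + 1) else d)
                        emission_counts).items]
            else acc)
          []) = _
  dsimp only
  rw [hcols, hpat, List.zip_map', List.foldl_map]
  dsimp only
  simp only [show ∀ col : List Char,
      (List.foldl (fun d c => if c ≠ '-' then d.modify (String.ofList [c]) 0 (· + 1) else d)
        (List.foldl (fun d a => d.insert (String.ofList [a]) 0) PySem.Dict.empty pvAmino) col) =
        pvAdict col from fun _ => rfl]
  rw [PySem.List.foldl_append_if
        (p := fun i => decide (((pvColumn ma i).count '-' : Int) < PySem.Int.floordiv (ma.length : Int) 2))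
        (f := fun i => (pvAdict (pvColumn ma i)).items)]
  rw [List.nil_append]

theorem pv_tally_fold (l : List String) (d : PySem.Dict Char Int) (i : Nat) (c : Char) :
    (l.foldl (fun t s =>
        let x := s.toList.getD i ' '
        t.insert x (t.getD x 0 + 1)) d).getD c 0 =
      d.getD c 0 + ((pvColumn l i).count c : Int) := by
  induction l generalizing d with
  | nil => simp [pvColumn]
  | cons s t ih =>
    rw [List.foldl_cons]
    dsimp only
    rw [ih]
    simp only [pvColumn, List.map_cons, List.count_cons, beq_iff_eq, PySem.Dict.getD_insert]
    by_cases hc : c = s.toList.getD i ' '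
    · subst hc; simp; omega
    · rw [if_neg hc, if_neg (fun h => hc h.symm)]
      push_cast
      ring


theorem pv_B_eq (ma : List String) :
    get_emission_counts_alt ma =
      ((List.range (ma.headD "").length).filter
          (fun i => decide (((pvColumn ma i).count '-' : Int) < PySem.Int.floordiv (ma.length : Int) 2))).map
        (fun i => pvAmino.map (fun a => (String.ofList [a], ((pvColumn ma i).count a : Int)))) := by
  have htally : ∀ (i : Nat) (c : Char),
      (ma.foldl (fun t s =>
          let x := s.toList.getD i ' '
          t.insert x (t.getD x 0 + 1)) PySem.Dict.empty).getD c 0 =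
        ((pvColumn ma i).count c : Int) := by
    intro i c
    rw [pv_tally_fold ma PySem.Dict.empty i c]
    simp [PySem.Dict.getD_empty]
  show (let threshold : Int := PySem.Int.floordiv (ma.length : Int) 2
        (List.range (ma.headD "").length).foldl
          (fun result i =>
            let tally : PySem.Dict Char Int :=
              ma.foldl (fun t s =>
                let c := s.toList.getD i ' '
                t.insert c (t.getD c 0 + 1)) PySem.Dict.empty
            if tally.getD '-' 0 < threshold then
              result ++ [pvAmino.map (fun a => (String.ofList [a], tally.getD a 0))]
            else result)
          []) = _
  dsimp only
  simp only [htally]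
  rw [PySem.List.foldl_append_ite
        (p := fun i => ((pvColumn ma i).count '-' : Int) < PySem.Int.floordiv (ma.length : Int) 2)
        (f := fun i => pvAmino.map (fun a => (String.ofList [a], ((pvColumn ma i).count a : Int))))]
  rw [List.nil_append]

theorem get_emission_counts_spec : Claim_equal_get_emission_counts := by
  intro ma _hdom hpre
  unfold Spec_get_emission_counts
  obtain ⟨-, -, hamino⟩ := hpre
  rw [List.all_eq_true] at hamino
  rw [pv_A_eq, pv_B_eq]
  apply List.map_congr_left
  intro i hi
  rw [List.mem_filter] at hi
  obtain ⟨hir, hlt⟩ := hi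
  have h2 : PySem.Int.floordiv (ma.length : Int) 2 = ((ma.length / 2 : Nat) : Int) := by
    exact_mod_cast PySem.Int.floordiv_natCast ma.length 2
  have hltn : (pvColumn ma i).count '-' < ma.length / 2 := by
    have hx := of_decide_eq_true hlt
    rw [h2] at hx
    exact_mod_cast hx
  have hcol : ∀ c ∈ pvColumn ma i, c = '-' ∨ c ∈ pvAmino := by
    have hb := hamino i hir
    rw [Bool.or_eq_true, Bool.not_eq_true', decide_eq_false_iff_not] at hb
    rcases hb with hb | hb
    · exact absurd hltn hb
    · rw [List.all_eq_true] at hb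
      intro c hc
      have := hb c hc
      rw [Bool.or_eq_true, beq_iff_eq] at this
      rcases this with h | h
      · exact Or.inl h
      · exact Or.inr (by simpa using h)
  exact pv_Adict_items _ hcol
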